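-- pv_equiv track=rewrite | github.com/Aspect022/Research2Text | src/agents/validator_agent.py | _find_entry_point
-- ===== SOURCE A (Python) =====
-- from typing import Any, Dict, List, Optional
--
-- def _find_entry_point(files: List[Dict[str, str]]) -> Optional[str]:
--     """Find the best entry point file to execute."""
--     paths = [f["path"] for f in files]
--     for candidate in ["train.py", "main.py", "run.py"]:
--         if candidate in paths:
--             return candidate
--     # Fall back to first .py file that's not model.py or utils.py
--     for p in paths:
--         if p.endswith(".py") and p not in ("model.py", "utils.py", "requirements.txt"):
--             return p
--     # Absolute last resort
--     for p in paths:
--         if p.endswith(".py"):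
--             return p
--     return None
-- ===== SOURCE B (Python) =====
-- def _find_entry_point(files):
--     """Find the best entry point file to execute (single keyed selection pass)."""
--     best = None  # (rank, path)
--     for f in files:
--         p = f["path"]
--         if p == "train.py":
--             r = 0
--         elif p == "main.py":
--             r = 1
--         elif p == "run.py":
--             r = 2
--         elif p.endswith(".py"):
--             r = 4 if p in ("model.py", "utils.py") else 3
--         else:
--             continue
--         if best is None or r < best[0]:
--             best = (r, p)
--     return best[1] if best is not None else None
-- ===== Notes on version B (the rewrite author's own statement) =====
-- stated objective: alternative
-- what changed: Replaces A's three separate scans over the path list (priority candidates, filtered .py fallback, any .py) by one selection pass that assigns each path a priority rank and keeps the lowest-ranked, first-seen path.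
import Mathlib
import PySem

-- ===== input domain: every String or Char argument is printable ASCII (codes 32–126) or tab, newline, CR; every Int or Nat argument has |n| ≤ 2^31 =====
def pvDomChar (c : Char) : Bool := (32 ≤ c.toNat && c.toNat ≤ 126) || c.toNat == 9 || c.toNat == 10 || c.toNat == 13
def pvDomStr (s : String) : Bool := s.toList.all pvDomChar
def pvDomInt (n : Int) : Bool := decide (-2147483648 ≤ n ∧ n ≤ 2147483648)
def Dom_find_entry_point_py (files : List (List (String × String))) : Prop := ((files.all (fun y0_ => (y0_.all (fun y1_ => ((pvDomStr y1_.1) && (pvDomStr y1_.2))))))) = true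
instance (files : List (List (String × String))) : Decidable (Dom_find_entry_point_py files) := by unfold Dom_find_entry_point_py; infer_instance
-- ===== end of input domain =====

-- B is an ALTERNATIVE decomposition of the same O(n) task: one keyed selection pass instead of A's three scans.

-- ===== PORT A =====
-- f["path"] (first-match lookup in the association list); a missing "path" key is a Python KeyError,
-- excluded by Pre_, so the .getD "" default is never reached on admitted inputs.
def pvPathOf (f : List (String × String)) : String := ((f.lookup "path").getD "")

-- literal transliteration of A: build paths, then three for-loops with early return (find?)
def find_entry_point_py (files : List (List (String × String))) : Option String :=
  let paths := files.map pvPathOf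
  match ["train.py", "main.py", "run.py"].find? (fun c => paths.contains c) with
  | some c => some c
  | none =>
    match paths.find? (fun p => PySem.Str.endswith p ".py"
        && !(p == "model.py" || p == "utils.py" || p == "requirements.txt")) with
    | some p => some p
    | none => paths.find? (fun p => PySem.Str.endswith p ".py")

-- ===== PORT B =====
-- priority rank of a path (5 = not selectable, the 'continue' case)
def pvRank (p : String) : Nat :=
  if p == "train.py" then 0
  else if p == "main.py" then 1
  else if p == "run.py" then 2
  else if PySem.Str.endswith p ".py" then
    (if p == "model.py" || p == "utils.py" then 4 else 3)
  else 5

-- one loop-body step: keep the best (lowest-rank, first-seen) pair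
def pvStep (acc : Option (Nat × String)) (p : String) : Option (Nat × String) :=
  let r := pvRank p
  if r == 5 then acc
  else match acc with
    | none => some (r, p)
    | some (br, bp) => if r < br then some (r, p) else some (br, bp)

def find_entry_point_py_alt (files : List (List (String × String))) : Option String :=
  (files.foldl (fun acc f => pvStep acc (pvPathOf f)) none).map (·.2)

-- ===== PRECONDITION & SPEC =====
-- Pre_ excludes exactly the inputs where the Python A raises KeyError: some file dict has
-- no "path" key (B raises there too).
def Pre_find_entry_point_py (files : List (List (String × String))) : Prop :=
  (files.all (fun f => (f.lookup "path").isSome)) = true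
instance (files : List (List (String × String))) : Decidable (Pre_find_entry_point_py files) := by
  unfold Pre_find_entry_point_py; infer_instance
def pvWitness_find_entry_point_py : (List (List (String × String))) :=
  [[("path", "main.py")], [("path", "x.py"), ("size", "3")]]
def Spec_find_entry_point_py (files : List (List (String × String))) (out : Option String) : Prop := out = find_entry_point_py_alt files
instance (files : List (List (String × String))) (out : Option String) : Decidable (Spec_find_entry_point_py files out) := by unfold Spec_find_entry_point_py; infer_instance

-- ===== CLAIM (what is proved, stated in full; the proofs are below) =====
def Claim_equal_find_entry_point_py : Prop := ∀ (files : List (List (String × String))), Dom_find_entry_point_py files → Pre_find_entry_point_py files → Spec_find_entry_point_py files (find_entry_point_py files)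

-- ===== LEMMAS AND PROOFS =====

-- A's algorithm on the bare path list
def pvASel (l : List String) : Option String :=
  match ["train.py", "main.py", "run.py"].find? (fun c => l.contains c) with
  | some c => some c
  | none =>
    match l.find? (fun p => PySem.Str.endswith p ".py"
        && !(p == "model.py" || p == "utils.py" || p == "requirements.txt")) with
    | some p => some p
    | none => l.find? (fun p => PySem.Str.endswith p ".py")

-- A's algorithm, returning the rank as well
def pvRankedA (l : List String) : Option (Nat × String) :=
  if l.contains "train.py" then some (0, "train.py")
  else if l.contains "main.py" then some (1, "main.py")
  else if l.contains "run.py" then some (2, "run.py")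
  else match l.find? (fun p => pvRank p == 3) with
    | some p => some (3, p)
    | none => match l.find? (fun p => pvRank p == 4) with
      | some p => some (4, p)
      | none => none

-- head-preferring best of a list of paths
def pvBest (l : List String) : Option (Nat × String) :=
  match l with
  | [] => none
  | p :: ps =>
    if pvRank p == 5 then pvBest ps
    else match pvBest ps with
      | none => some (pvRank p, p)
      | some (br, bp) => if pvRank p ≤ br then some (pvRank p, p) else some (br, bp)

-- accumulator-preferring combination (what the fold computes)
def pvComb (acc b : Option (Nat × String)) : Option (Nat × String) :=
  match acc, b with
  | none, b => b
  | some a, none => some a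
  | some a, some b => if b.1 < a.1 then some b else some a

theorem pvFold_comb (l : List String) (acc : Option (Nat × String)) :
    l.foldl pvStep acc = pvComb acc (pvBest l) := by
  induction l generalizing acc with
  | nil => cases acc <;> simp [pvComb, pvBest]
  | cons p ps ih =>
    rw [List.foldl_cons, ih]
    by_cases h5 : pvRank p = 5
    · cases acc <;> simp [pvStep, pvBest, h5]
    · cases acc with
      | none =>
        cases hb : pvBest ps with
        | none => simp [pvStep, pvBest, pvComb, h5, hb]
        | some b =>
          obtain ⟨br, bp⟩ := b
          by_cases hle : pvRank p ≤ br <;>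
            simp [pvStep, pvBest, pvComb, h5, hb, hle] <;> omega
      | some a =>
        obtain ⟨ar, ap⟩ := a
        cases hb : pvBest ps with
        | none =>
          by_cases hlt : pvRank p < ar <;>
            simp [pvStep, pvBest, pvComb, h5, hb, hlt]
        | some b =>
          obtain ⟨br, bp⟩ := b
          by_cases hlt : pvRank p < ar <;>
            by_cases hle : pvRank p ≤ br <;>
            by_cases hba : br < ar <;>
            simp [pvStep, pvBest, pvComb, h5, hb, hlt, hle, hba] <;> omega

-- how the rank pvRankedA returns is bounded below by the absence of the candidates
theorem pvRankedA_lb (l : List String) (br : Nat) (bp : String)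
    (h : pvRankedA l = some (br, bp)) :
    br ≤ 4 ∧ (br = 0 → l.contains "train.py" = true) ∧
      (br = 1 → l.contains "main.py" = true) ∧ (br = 2 → l.contains "run.py" = true) := by
  unfold pvRankedA at h
  split_ifs at h with h1 h2 h3
  · simp only [Option.some.injEq, Prod.mk.injEq] at h
    exact ⟨by omega, fun _ => h1, fun e => by omega, fun e => by omega⟩
  · simp only [Option.some.injEq, Prod.mk.injEq] at h
    exact ⟨by omega, fun e => by omega, fun _ => h2, fun e => by omega⟩
  · simp only [Option.some.injEq, Prod.mk.injEq] at h
    exact ⟨by omega, fun e => by omega, fun e => by omega, fun _ => h3⟩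
  · cases h4 : l.find? (fun p => pvRank p == 3) with
    | some q =>
      rw [h4] at h
      simp only [Option.some.injEq, Prod.mk.injEq] at h
      exact ⟨by omega, fun e => by omega, fun e => by omega, fun e => by omega⟩
    | none =>
      rw [h4] at h
      cases h5 : l.find? (fun p => pvRank p == 4) with
      | some q =>
        rw [h5] at h
        simp only [Option.some.injEq, Prod.mk.injEq] at h
        exact ⟨by omega, fun e => by omega, fun e => by omega, fun e => by omega⟩
      | none => rw [h5] at h; exact absurd h (by simp)

-- find? on a cons, as a plain if
theorem pvFind_cons {α : Type} (l : List α) (p : α → Bool) (a : α) :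
    (a :: l).find? p = if p a then some a else l.find? p := by
  simp [List.find?]; split <;> simp_all

-- the candidate loop of A unfolded to the if-chain of pvRankedA's first three branches
theorem pvRankedA_eq_best (l : List String) : pvRankedA l = pvBest l := by
  induction l with
  | nil => simp [pvRankedA, pvBest]
  | cons p ps ih =>
    rw [pvBest, ← ih]
    by_cases h0 : p = "train.py"
    · -- rank 0
      subst h0
      cases hb : pvRankedA ps with
      | none => simp [pvRankedA, pvRank]
      | some b =>
        obtain ⟨br, bp⟩ := b
        have := pvRankedA_lb ps br bp hb
        rw [show pvRank "train.py" = 0 from rfl]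
        simp only [show ((0 : Nat) == 5) = false from rfl, Bool.false_eq_true, if_false]
        rw [if_pos (by omega : (0:Nat) ≤ br)]
        simp [pvRankedA]
    by_cases h1 : p = "main.py"
    · -- rank 1
      subst h1
      rw [show pvRank "main.py" = 1 from rfl]
      simp only [show ((1 : Nat) == 5) = false from rfl, Bool.false_eq_true, if_false]
      by_cases htr : ps.contains "train.py" = true
      · have e : pvRankedA ps = some (0, "train.py") := by unfold pvRankedA; rw [if_pos htr]
        rw [e]; dsimp only; rw [if_neg (by omega)]
        unfold pvRankedA
        simp [List.contains_iff_mem.mp htr]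
      · have hcons : (("main.py" :: ps).contains "train.py") = ps.contains "train.py" := by
          simp [List.contains_cons]
        cases hb : pvRankedA ps with
        | none =>
          unfold pvRankedA at hb ⊢
          rw [hcons, if_neg htr] at *
          split_ifs at hb with g2 g3 <;> first
            | simp_all
            | (rw [if_neg htr, if_pos (by simp [List.contains_cons])]; rfl)
        | some b =>
          obtain ⟨br, bp⟩ := b
          obtain ⟨hb4, hb0, hb1, hb2⟩ := pvRankedA_lb ps br bp hb
          have : 1 ≤ br := by
            rcases Nat.eq_zero_or_pos br with h | h
            · exact absurd (hb0 h) htr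
            · exact h
          dsimp only
          rw [if_pos this]
          unfold pvRankedA
          rw [hcons, if_neg htr, if_pos (by simp [List.contains_cons])]
    by_cases h2 : p = "run.py"
    · -- rank 2
      subst h2
      rw [show pvRank "run.py" = 2 from rfl]
      simp only [show ((2 : Nat) == 5) = false from rfl, Bool.false_eq_true, if_false]
      have hctr : (("run.py" :: ps).contains "train.py") = ps.contains "train.py" := by
        simp [List.contains_cons]
      have hcmn : (("run.py" :: ps).contains "main.py") = ps.contains "main.py" := by
        simp [List.contains_cons]
      by_cases htr : ps.contains "train.py" = true
      · have e : pvRankedA ps = some (0, "train.py") := by unfold pvRankedA; rw [if_pos htr]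
        rw [e]; dsimp only; rw [if_neg (by omega)]
        unfold pvRankedA; simp [List.contains_iff_mem.mp htr]
      by_cases hmn : ps.contains "main.py" = true
      · have e : pvRankedA ps = some (1, "main.py") := by
          unfold pvRankedA; rw [if_neg htr, if_pos hmn]
        rw [e]; dsimp only; rw [if_neg (by omega)]
        unfold pvRankedA
        rw [hctr, if_neg htr, hcmn, if_pos hmn]
      · cases hb : pvRankedA ps with
        | none =>
          unfold pvRankedA
          rw [hctr, if_neg htr, hcmn, if_neg hmn, if_pos (by simp [List.contains_cons])]
        | some b =>
          obtain ⟨br, bp⟩ := b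
          obtain ⟨hb4, hb0, hb1, hb2⟩ := pvRankedA_lb ps br bp hb
          have : 2 ≤ br := by
            rcases Nat.lt_or_ge br 2 with h | h
            · interval_cases br
              · exact absurd (hb0 rfl) htr
              · exact absurd (hb1 rfl) hmn
            · exact h
          dsimp only
          rw [if_pos this]
          unfold pvRankedA
          rw [hctr, if_neg htr, hcmn, if_neg hmn, if_pos (by simp [List.contains_cons])]
    · -- p is not one of the three candidates: rank 3, 4 or 5
      have hctr : (p :: ps).contains "train.py" = ps.contains "train.py" := by
        simp [List.contains_cons, Ne.symm h0]
      have hcmn : (p :: ps).contains "main.py" = ps.contains "main.py" := by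
        simp [List.contains_cons, Ne.symm h1]
      have hcrn : (p :: ps).contains "run.py" = ps.contains "run.py" := by
        simp [List.contains_cons, Ne.symm h2]
      have hr345 : pvRank p = 3 ∨ pvRank p = 4 ∨ pvRank p = 5 := by
        unfold pvRank
        rw [if_neg (by simpa using h0), if_neg (by simpa using h1), if_neg (by simpa using h2)]
        split_ifs <;> omega
      by_cases htr : ps.contains "train.py" = true
      · -- a candidate in the tail wins in both versions
        have e : pvRankedA ps = some (0, "train.py") := by unfold pvRankedA; rw [if_pos htr]
        have e2 : pvRankedA (p :: ps) = some (0, "train.py") := by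
          unfold pvRankedA; rw [hctr, if_pos htr]
        rw [e, e2]
        rcases hr345 with h | h | h <;> simp [h]
      by_cases hmn : ps.contains "main.py" = true
      · have e : pvRankedA ps = some (1, "main.py") := by
          unfold pvRankedA; rw [if_neg htr, if_pos hmn]
        have e2 : pvRankedA (p :: ps) = some (1, "main.py") := by
          unfold pvRankedA; rw [hctr, if_neg htr, hcmn, if_pos hmn]
        rw [e, e2]
        rcases hr345 with h | h | h <;> simp [h]
      by_cases hrn : ps.contains "run.py" = true
      · have e : pvRankedA ps = some (2, "run.py") := by
          unfold pvRankedA; rw [if_neg htr, if_neg hmn, if_pos hrn]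
        have e2 : pvRankedA (p :: ps) = some (2, "run.py") := by
          unfold pvRankedA; rw [hctr, if_neg htr, hcmn, if_neg hmn, hcrn, if_pos hrn]
        rw [e, e2]
        rcases hr345 with h | h | h <;> simp [h]
      · -- no candidate anywhere
        have eA : pvRankedA (p :: ps) =
            (match (p :: ps).find? (fun q => pvRank q == 3) with
              | some q => some (3, q)
              | none => match (p :: ps).find? (fun q => pvRank q == 4) with
                | some q => some (4, q)
                | none => none) := by
          unfold pvRankedA
          rw [hctr, if_neg htr, hcmn, if_neg hmn, hcrn, if_neg hrn]
        have eAps : pvRankedA ps =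
            (match ps.find? (fun q => pvRank q == 3) with
              | some q => some (3, q)
              | none => match ps.find? (fun q => pvRank q == 4) with
                | some q => some (4, q)
                | none => none) := by
          unfold pvRankedA
          rw [if_neg htr, if_neg hmn, if_neg hrn]
        rcases hr345 with h | h | h
        · -- rank 3: head wins both loops immediately
          rw [eA, pvFind_cons, if_pos (by simp [h]), eAps]
          cases hf : ps.find? (fun q => pvRank q == 3) with
          | none =>
            cases hf4 : ps.find? (fun q => pvRank q == 4) with
            | none => simp [h]
            | some q =>
              have hq4 : pvRank q = 4 := by
                have := List.find?_some hf4; simpa using this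
              simp [h]
          | some q =>
            have hq3 : pvRank q = 3 := by
              have := List.find?_some hf; simpa using this
            simp [h]
        · -- rank 4
          rw [eA, pvFind_cons, if_neg (by simp [h]), pvFind_cons, if_pos (by simp [h]), eAps]
          cases hf : ps.find? (fun q => pvRank q == 3) with
          | none =>
            cases hf4 : ps.find? (fun q => pvRank q == 4) with
            | none => simp [h]
            | some q => simp [h]
          | some q =>
            have hq3 : pvRank q = 3 := by
              have := List.find?_some hf; simpa using this
            simp [h]
        · -- rank 5: head passes through everything
          rw [eA, pvFind_cons, if_neg (by simp [h]), pvFind_cons, if_neg (by simp [h]), eAps]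
          simp [h]

-- pointwise: A's second-loop predicate is 'rank = 3' when the path is not a candidate
theorem pvPred1_eq (x : String) (h1 : x ≠ "train.py") (h2 : x ≠ "main.py") (h3 : x ≠ "run.py") :
    (PySem.Str.endswith x ".py"
      && !(x == "model.py" || x == "utils.py" || x == "requirements.txt"))
      = (pvRank x == 3) := by
  by_cases hr : x = "requirements.txt"
  · subst hr; decide
  · unfold pvRank
    rw [if_neg (by simpa using h1), if_neg (by simpa using h2), if_neg (by simpa using h3)]
    cases hE : PySem.Str.endswith x ".py" with
    | false => simp [hE]
    | true =>
      rw [if_pos rfl]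
      by_cases hmu : (x == "model.py" || x == "utils.py") = true
      · rw [if_pos hmu]; simp [hE, hmu]
      · rw [if_neg hmu]
        simp only [Bool.or_eq_true, beq_iff_eq, not_or] at hmu
        simp [hE, hmu.1, hmu.2, hr]

-- pointwise: A's third-loop predicate is 'rank = 4' when no candidate and rank ≠ 3
theorem pvPred2_eq (x : String) (h1 : x ≠ "train.py") (h2 : x ≠ "main.py") (h3 : x ≠ "run.py")
    (h4 : pvRank x ≠ 3) : PySem.Str.endswith x ".py" = (pvRank x == 4) := by
  unfold pvRank at h4 ⊢
  rw [if_neg (by simpa using h1), if_neg (by simpa using h2), if_neg (by simpa using h3)] at h4 ⊢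
  cases hE : PySem.Str.endswith x ".py" with
  | false => simp [hE]
  | true =>
    rw [if_pos rfl]
    rw [if_pos hE] at h4
    split_ifs at h4 ⊢ with hmu
    · simp
    · omega

theorem pvFind_congr {α : Type} (l : List α) (p q : α → Bool) (h : ∀ x ∈ l, p x = q x) :
    l.find? p = l.find? q := by
  induction l with
  | nil => rfl
  | cons a as ih =>
    rw [pvFind_cons, pvFind_cons, h a (by simp), ih (fun x hx => h x (by simp [hx]))]

theorem pvASel_eq_rankedA (l : List String) : pvASel l = (pvRankedA l).map (·.2) := by
  unfold pvASel pvRankedA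
  by_cases htr : "train.py" ∈ l
  · rw [if_pos (List.contains_iff_mem.mpr htr)]
    simp [pvFind_cons, htr]
  by_cases hmn : "main.py" ∈ l
  · rw [if_neg (fun h => htr (List.contains_iff_mem.mp h)),
      if_pos (List.contains_iff_mem.mpr hmn)]
    simp [pvFind_cons, htr, hmn]
  by_cases hrn : "run.py" ∈ l
  · rw [if_neg (fun h => htr (List.contains_iff_mem.mp h)),
      if_neg (fun h => hmn (List.contains_iff_mem.mp h)),
      if_pos (List.contains_iff_mem.mpr hrn)]
    simp [pvFind_cons, htr, hmn, hrn]
  · rw [if_neg (fun h => htr (List.contains_iff_mem.mp h)),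
      if_neg (fun h => hmn (List.contains_iff_mem.mp h)),
      if_neg (fun h => hrn (List.contains_iff_mem.mp h))]
    rw [pvFind_cons, if_neg (by simpa [List.contains_iff_mem] using htr),
      pvFind_cons, if_neg (by simpa [List.contains_iff_mem] using hmn),
      pvFind_cons, if_neg (by simpa [List.contains_iff_mem] using hrn)]
    simp only [List.find?_nil]
    have hne : ∀ x ∈ l, x ≠ "train.py" ∧ x ≠ "main.py" ∧ x ≠ "run.py" := by
      intro x hx
      refine ⟨?_, ?_, ?_⟩ <;> rintro rfl
      · exact htr hx
      · exact hmn hx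
      · exact hrn hx
    rw [pvFind_congr l _ (fun x => pvRank x == 3)
      (fun x hx => pvPred1_eq x (hne x hx).1 (hne x hx).2.1 (hne x hx).2.2)]
    cases hf : l.find? (fun q => pvRank q == 3) with
    | some q => simp
    | none =>
      have h43 : ∀ x ∈ l, pvRank x ≠ 3 := by
        intro x hx
        have := List.find?_eq_none.mp hf x hx
        simpa using this
      rw [pvFind_congr l _ (fun x => pvRank x == 4)
        (fun x hx => pvPred2_eq x (hne x hx).1 (hne x hx).2.1 (hne x hx).2.2 (h43 x hx))]
      cases hf4 : l.find? (fun q => pvRank q == 4) with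
      | some q => simp
      | none => simp

theorem pv_main (l : List String) : pvASel l = (l.foldl pvStep none).map (·.2) := by
  rw [pvFold_comb, pvASel_eq_rankedA, pvRankedA_eq_best]
  rfl

-- ===== VERDICT (by name: the statement is the Claim_ definition above) =====
theorem find_entry_point_py_spec : Claim_equal_find_entry_point_py := by
  intro files _ _
  unfold Spec_find_entry_point_py find_entry_point_py find_entry_point_py_alt
  have := pv_main (files.map pvPathOf)
  unfold pvASel at this
  rw [this, List.foldl_map]
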